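-- pv_equiv track=rewrite | github.com/miliar/Code_Jam_Webscraper | solutions_python/Problem_200/1626.py | rec
-- ===== SOURCE A (Python) =====
-- def rec(acc, num_digits, n):
--     end = -1
--     if acc == 0:
--         end = 0
--
--     if num_digits == 0:
--         return acc
--
--     for digit in range(9, 0, -1):
--         dlist = [digit for _ in range(num_digits)]
--         idlist = sum(10 ** i * dlist[i] for i in range(num_digits))
--         #print (acc, idlist)
--         if acc + idlist <= n:
--             return rec(acc + digit*10**(num_digits-1), num_digits - 1, n)
--
--     return -1;
-- ===== SOURCE B (Python) =====
-- def rec(acc, num_digits, n):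
--     # Closed-form digit choice: the level's idlist is digit * repunit, so the
--     # largest fitting digit is min((n - acc) // repunit, 9); no 9-way scan.
--     while num_digits > 0:
--         rep = (10 ** num_digits - 1) // 9
--         d = (n - acc) // rep
--         if d < 1:
--             return -1
--         if d > 9:
--             d = 9
--         acc += d * 10 ** (num_digits - 1)
--         num_digits -= 1
--     return acc
-- ===== Notes on version B (the rewrite author's own statement) =====
-- stated objective: faster
-- what changed: Replaces the recursive 9-way digit scan (each digit re-summing 10**i over all positions) by an iterative loop that computes the level's repunit once and picks the fitting digit in closed form as min((n-acc)//repunit, 9).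
-- outside the precondition, e.g. on rec(5, -1, 3): A returns -1, B returns 5
import Mathlib
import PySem

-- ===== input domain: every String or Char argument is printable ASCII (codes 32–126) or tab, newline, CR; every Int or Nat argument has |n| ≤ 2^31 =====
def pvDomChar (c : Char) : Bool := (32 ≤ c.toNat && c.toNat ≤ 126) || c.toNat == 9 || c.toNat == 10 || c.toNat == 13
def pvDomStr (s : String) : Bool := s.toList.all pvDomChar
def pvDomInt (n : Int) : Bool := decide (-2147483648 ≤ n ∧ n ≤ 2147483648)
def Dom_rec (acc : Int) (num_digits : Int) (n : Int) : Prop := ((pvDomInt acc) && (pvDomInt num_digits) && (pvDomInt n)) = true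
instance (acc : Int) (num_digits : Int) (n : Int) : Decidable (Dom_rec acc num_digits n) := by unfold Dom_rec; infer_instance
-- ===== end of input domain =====

-- B replaces A's recursive 9-way digit scan (each digit re-summing 10**i over all
-- positions) by a loop that computes the level's repunit once and picks the fitting
-- digit in closed form; objective: faster (constant factor).

-- ===== PORT A =====
-- first digit in [9,8,...,1] whose idlist fits (the for-loop with early return)
def recChoose (digits : List Int) (acc : Int) (m : Nat) (n : Int) : Option Int :=
  match digits with
  | [] => none
  | d :: ds =>
      let dlist := List.replicate m d
      let idlist := ((List.range m).map (fun i => (10:Int)^i * dlist.getD i 0)).sum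
      if acc + idlist ≤ n then some d else recChoose ds acc m n

def recA : Nat → Int → Int → Int
  | 0, acc, _ => acc
  | k + 1, acc, n =>
      match recChoose [9, 8, 7, 6, 5, 4, 3, 2, 1] acc (k + 1) n with
      | some d => recA k (acc + d * 10 ^ k) n
      | none => -1

-- for num_digits < 0 Python A diverges or returns -1 (outside Pre_rec); the
-- guard only makes the port total there.
def rec (acc : Int) (num_digits : Int) (n : Int) : Int :=
  if num_digits < 0 then -1 else recA num_digits.toNat acc n

-- ===== PORT B =====
def recBLoop : Nat → Int → Int → Int
  | 0, acc, _ => acc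
  | k + 1, acc, n =>
      let rep := PySem.Int.floordiv (10 ^ (k + 1) - 1) 9
      let d := PySem.Int.floordiv (n - acc) rep
      if d < 1 then -1
      else
        let d := if d > 9 then 9 else d
        recBLoop k (acc + d * 10 ^ k) n

def rec_alt (acc : Int) (num_digits : Int) (n : Int) : Int :=
  recBLoop num_digits.toNat acc n

-- ===== PRECONDITION & SPEC =====
-- Pre_ excludes num_digits < 0 (outside the task's natural domain): there
-- Python A either recurses forever (RecursionError, when acc < n) or falls
-- through its digit scan with empty idlists and returns -1, an accident of
-- the implementation; B's loop simply does not run there.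
def Pre_rec (acc : Int) (num_digits : Int) (n : Int) : Prop := 0 ≤ num_digits
instance (acc : Int) (num_digits : Int) (n : Int) : Decidable (Pre_rec acc num_digits n) := by unfold Pre_rec; infer_instance
def pvWitness_rec : Int × Int × Int := (0, 3, 215)

def Spec_rec (acc : Int) (num_digits : Int) (n : Int) (out : Int) : Prop := out = rec_alt acc num_digits n
instance (acc : Int) (num_digits : Int) (n : Int) (out : Int) : Decidable (Spec_rec acc num_digits n out) := by unfold Spec_rec; infer_instance

-- ===== CLAIM (what is proved, stated in full; the proofs are below) =====
def Claim_equal_rec : Prop := ∀ (acc : Int) (num_digits : Int) (n : Int), Dom_rec acc num_digits n → Pre_rec acc num_digits n → Spec_rec acc num_digits n (rec acc num_digits n)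

-- ===== LEMMAS AND PROOFS =====

-- the repunit with m ones
def repu (m : Nat) : Int := ((List.range m).map (fun i => (10:Int)^i)).sum

lemma nine_repu (m : Nat) : 9 * repu m = 10 ^ m - 1 := by
  induction m with
  | zero => simp [repu]
  | succ k ih =>
      rw [repu, List.range_succ, List.map_append, List.sum_append]
      rw [repu] at ih
      simp only [List.map_cons, List.map_nil, List.sum_cons, List.sum_nil]
      rw [pow_succ]
      linarith

lemma repu_pos (m : Nat) : 0 < repu (m + 1) := by
  have h := nine_repu (m + 1)
  have : (1:Int) ≤ 10 ^ (m + 1) := one_le_pow₀ (by norm_num)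
  omega

lemma idlist_eq (d : Int) (m : Nat) :
    ((List.range m).map (fun i => (10:Int)^i * (List.replicate m d).getD i 0)).sum
      = d * repu m := by
  unfold repu
  rw [← List.sum_map_mul_left]
  apply congrArg
  apply List.map_congr_left
  intro i hi
  rw [List.mem_range] at hi
  rw [List.getD_eq_getElem?_getD, List.getElem?_replicate, if_pos hi]
  simp [mul_comm]

lemma rep_eq (k : Nat) : PySem.Int.floordiv (10 ^ (k + 1) - 1) 9 = repu (k + 1) := by
  have h := nine_repu (k + 1)
  rw [← h]
  rw [PySem.Int.floordiv_eq_ediv_of_pos (by norm_num)]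
  omega

lemma cond_iff (acc n d : Int) (m : Nat) :
    (acc + d * repu (m + 1) ≤ n) ↔ d ≤ PySem.Int.floordiv (n - acc) (repu (m + 1)) := by
  rw [PySem.Int.le_floordiv_iff_mul_le (repu_pos m)]
  constructor <;> intro h <;> omega

lemma choose_eq (acc n q : Int) (k : Nat)
    (hq : q = PySem.Int.floordiv (n - acc) (repu (k + 1))) :
    recChoose [9, 8, 7, 6, 5, 4, 3, 2, 1] acc (k + 1) n
      = (if q < 1 then none else some (if q > 9 then 9 else q)) := by
  have hc : ∀ d : Int, (acc + ((List.range (k+1)).map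
      (fun i => (10:Int)^i * (List.replicate (k+1) d).getD i 0)).sum ≤ n) ↔ d ≤ q := by
    intro d; rw [idlist_eq, hq]; exact cond_iff acc n d k
  simp only [recChoose]
  by_cases h9 : (9:Int) ≤ q
  · rw [if_pos ((hc 9).mpr h9)]
    split_ifs <;> first | rfl | (exfalso; omega) | (congr 1; omega)
  · rw [if_neg (fun h => h9 ((hc 9).mp h))]
    by_cases h8 : (8:Int) ≤ q
    · rw [if_pos ((hc 8).mpr h8)]
      split_ifs <;> first | rfl | (exfalso; omega) | (congr 1; omega)
    · rw [if_neg (fun h => h8 ((hc 8).mp h))]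
      by_cases h7 : (7:Int) ≤ q
      · rw [if_pos ((hc 7).mpr h7)]
        split_ifs <;> first | rfl | (exfalso; omega) | (congr 1; omega)
      · rw [if_neg (fun h => h7 ((hc 7).mp h))]
        by_cases h6 : (6:Int) ≤ q
        · rw [if_pos ((hc 6).mpr h6)]
          split_ifs <;> first | rfl | (exfalso; omega) | (congr 1; omega)
        · rw [if_neg (fun h => h6 ((hc 6).mp h))]
          by_cases h5 : (5:Int) ≤ q
          · rw [if_pos ((hc 5).mpr h5)]
            split_ifs <;> first | rfl | (exfalso; omega) | (congr 1; omega)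
          · rw [if_neg (fun h => h5 ((hc 5).mp h))]
            by_cases h4 : (4:Int) ≤ q
            · rw [if_pos ((hc 4).mpr h4)]
              split_ifs <;> first | rfl | (exfalso; omega) | (congr 1; omega)
            · rw [if_neg (fun h => h4 ((hc 4).mp h))]
              by_cases h3 : (3:Int) ≤ q
              · rw [if_pos ((hc 3).mpr h3)]
                split_ifs <;> first | rfl | (exfalso; omega) | (congr 1; omega)
              · rw [if_neg (fun h => h3 ((hc 3).mp h))]
                by_cases h2 : (2:Int) ≤ q
                · rw [if_pos ((hc 2).mpr h2)]
                  split_ifs <;> first | rfl | (exfalso; omega) | (congr 1; omega)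
                · rw [if_neg (fun h => h2 ((hc 2).mp h))]
                  by_cases h1 : (1:Int) ≤ q
                  · rw [if_pos ((hc 1).mpr h1)]
                    split_ifs <;> first | rfl | (exfalso; omega) | (congr 1; omega)
                  · rw [if_neg (fun h => h1 ((hc 1).mp h))]
                    rw [if_pos (by omega)]

lemma recA_eq_recB (k : Nat) : ∀ (acc n : Int), recA k acc n = recBLoop k acc n := by
  induction k with
  | zero => intro acc n; rfl
  | succ k ih =>
      intro acc n
      simp only [recA]
      rw [choose_eq acc n _ k rfl]
      simp only [recBLoop, rep_eq]
      by_cases h : PySem.Int.floordiv (n - acc) (repu (k + 1)) < 1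
      · rw [if_pos h, if_pos h]
      · rw [if_neg h, if_neg h]
        exact ih _ n

-- ===== VERDICT (by name: the statement is the Claim_ definition above) =====
theorem rec_spec : Claim_equal_rec := by
  intro acc num_digits n _ hpre
  unfold Spec_rec rec rec_alt
  rw [if_neg (by unfold Pre_rec at hpre; omega)]
  exact recA_eq_recB _ acc n
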